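-- pv_equiv track=rewrite | github.com/tanghaibao/jcvi | jcvi/utils/range.py | ranges_intersect
-- ===== SOURCE A (Python) =====
-- def range_intersect(a, b, extend=0):
--     """
--     Returns the intersection between two reanges.
--
--     >>> range_intersect((30, 45), (55, 65))
--     >>> range_intersect((48, 65), (45, 55))
--     [48, 55]
--     """
--     a_min, a_max = a
--     if a_min > a_max:
--         a_min, a_max = a_max, a_min
--     b_min, b_max = b
--     if b_min > b_max:
--         b_min, b_max = b_max, b_min
--
--     if a_max + extend < b_min or b_max + extend < a_min:
--         return None
--     i_min = max(a_min, b_min)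
--     i_max = min(a_max, b_max)
--     if i_min > i_max + extend:
--         return None
--
--     return [i_min, i_max]
--
-- def ranges_intersect(rset):
--     """
--     Recursively calls the range_intersect() - pairwise version.
--
--     >>> ranges_intersect([(48, 65), (45, 55), (50, 56)])
--     [50, 55]
--     """
--     if not rset:
--         return None
--
--     a = rset[0]
--     for b in rset[1:]:
--         if not a:
--             return None
--         a = range_intersect(a, b)
--
--     return a
-- ===== SOURCE B (Python) =====
-- def ranges_intersect(rset):
--     if not rset:
--         return None
--     if len(rset) == 1:
--         return rset[0]
--     lo = max(min(r) for r in rset)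
--     hi = min(max(r) for r in rset)
--     return None if lo > hi else [lo, hi]
-- ===== Notes on version B (the rewrite author's own statement) =====
-- stated objective: simpler
-- what changed: Replaces the left fold of pairwise range_intersect with a direct global intersection: one pass computing max of the mins and min of the maxes, then a single emptiness test (singleton lists return rset[0] unchanged, as A does).
import Mathlib
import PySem

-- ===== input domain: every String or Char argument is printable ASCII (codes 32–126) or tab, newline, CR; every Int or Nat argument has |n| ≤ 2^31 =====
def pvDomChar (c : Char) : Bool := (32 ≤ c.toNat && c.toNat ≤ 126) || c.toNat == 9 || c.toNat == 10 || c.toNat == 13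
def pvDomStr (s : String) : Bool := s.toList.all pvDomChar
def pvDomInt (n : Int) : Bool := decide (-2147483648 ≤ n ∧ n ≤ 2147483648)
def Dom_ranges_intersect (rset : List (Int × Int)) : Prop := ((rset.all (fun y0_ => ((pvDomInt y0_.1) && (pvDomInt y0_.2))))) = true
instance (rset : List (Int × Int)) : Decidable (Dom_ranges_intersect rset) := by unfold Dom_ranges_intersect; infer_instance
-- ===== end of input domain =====

-- B replaces the left fold of pairwise range_intersect with a direct global intersection (max of mins vs min of maxes); objective: simpler.


-- ===== PORT A =====
-- helper: literal port of range_intersect(a, b) with extend = 0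
def rangeIntersectAB (a b : Int × Int) : Option (Int × Int) :=
  let am := a.1; let aM := a.2
  let (a_min, a_max) := if am > aM then (aM, am) else (am, aM)
  let bm := b.1; let bM := b.2
  let (b_min, b_max) := if bm > bM then (bM, bm) else (bm, bM)
  if a_max + 0 < b_min ∨ b_max + 0 < a_min then none
  else
    let i_min := max a_min b_min
    let i_max := min a_max b_max
    if i_min > i_max + 0 then none
    else some (i_min, i_max)

def ranges_intersect (rset : List (Int × Int)) : Option (List Int) :=
  match rset with
  | [] => none
  | a :: rest =>
    (rest.foldl (fun acc b =>
        match acc with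
        | none => none                 -- "if not a: return None"
        | some a => rangeIntersectAB a b) (some a)).map
      (fun p => [p.1, p.2])

-- ===== PORT B =====
def ranges_intersect_alt (rset : List (Int × Int)) : Option (List Int) :=
  match rset with
  | [] => none
  | [r] => some [r.1, r.2]
  | r :: rest =>
    let lo := rest.foldl (fun m q => max m (min q.1 q.2)) (min r.1 r.2)
    let hi := rest.foldl (fun m q => min m (max q.1 q.2)) (max r.1 r.2)
    if lo > hi then none else some [lo, hi]

-- ===== PRECONDITION & SPEC =====
def Spec_ranges_intersect (rset : List (Int × Int)) (out : Option (List Int)) : Prop := out = ranges_intersect_alt rset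
instance (rset : List (Int × Int)) (out : Option (List Int)) : Decidable (Spec_ranges_intersect rset out) := by unfold Spec_ranges_intersect; infer_instance

-- ===== CLAIM (what is proved, stated in full; the proofs are below) =====
def Claim_equal_ranges_intersect : Prop := ∀ (rset : List (Int × Int)), Dom_ranges_intersect rset → Spec_ranges_intersect rset (ranges_intersect rset)

-- ===== LEMMAS AND PROOFS =====

-- ===== VERDICT (by name: the statement is the Claim_ definition above) =====
theorem foldl_none (rest : List (Int × Int)) :
    rest.foldl (fun acc b =>
        match acc with
        | none => none
        | some a => rangeIntersectAB a b) (none : Option (Int × Int)) = none := by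
  induction rest with
  | nil => rfl
  | cons b rest ih => simpa using ih

theorem rangeIntersectAB_eq (a b : Int × Int) :
    rangeIntersectAB a b =
      (if max (min a.1 a.2) (min b.1 b.2) > min (max a.1 a.2) (max b.1 b.2) then none
       else some (max (min a.1 a.2) (min b.1 b.2), min (max a.1 a.2) (max b.1 b.2))) := by
  obtain ⟨am, aM⟩ := a
  obtain ⟨bm, bM⟩ := b
  simp only [rangeIntersectAB]
  split_ifs <;> simp_all <;> omega

theorem foldl_inter (rest : List (Int × Int)) (p q : Int) (h : rest ≠ []) :
    rest.foldl (fun acc b =>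
        match acc with
        | none => none
        | some a => rangeIntersectAB a b) (some (p, q)) =
      (if rest.foldl (fun m r => max m (min r.1 r.2)) (min p q) >
          rest.foldl (fun m r => min m (max r.1 r.2)) (max p q) then none
       else some (rest.foldl (fun m r => max m (min r.1 r.2)) (min p q),
                  rest.foldl (fun m r => min m (max r.1 r.2)) (max p q))) := by
  induction rest generalizing p q with
  | nil => exact absurd rfl h
  | cons b rest ih =>
    simp only [List.foldl_cons]
    rw [rangeIntersectAB_eq]
    by_cases hb : max (min p q) (min b.1 b.2) > min (max p q) (max b.1 b.2)
    · rw [if_pos hb, foldl_none]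
      have h1 : rest.foldl (fun m r => max m (min r.1 r.2)) (max (min p q) (min b.1 b.2)) >
          rest.foldl (fun m r => min m (max r.1 r.2)) (min (max p q) (max b.1 b.2)) := by
        have hlo : ∀ (l : List (Int × Int)) (x : Int),
            x ≤ l.foldl (fun m r => max m (min r.1 r.2)) x := by
          intro l; induction l with
          | nil => intro x; simp
          | cons c l ihc =>
            intro x
            exact le_trans (le_max_left _ _) (ihc (max x (min c.1 c.2)))
        have hhi : ∀ (l : List (Int × Int)) (x : Int),
            l.foldl (fun m r => min m (max r.1 r.2)) x ≤ x := by
          intro l; induction l with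
          | nil => intro x; simp
          | cons c l ihc =>
            intro x
            exact le_trans (ihc (min x (max c.1 c.2))) (min_le_left _ _)
        have := hlo rest (max (min p q) (min b.1 b.2))
        have := hhi rest (min (max p q) (max b.1 b.2))
        omega
      rw [if_pos h1]
    · rw [if_neg hb]
      cases rest with
      | nil => simp at *; omega
      | cons c rest' =>
        rw [ih _ _ (by simp)]
        have hmin : min (max (min p q) (min b.1 b.2)) (min (max p q) (max b.1 b.2)) =
            max (min p q) (min b.1 b.2) := by omega
        have hmax : max (max (min p q) (min b.1 b.2)) (min (max p q) (max b.1 b.2)) =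
            min (max p q) (max b.1 b.2) := by omega
        rw [hmin, hmax]

theorem ranges_intersect_spec : Claim_equal_ranges_intersect := by
  intro rset _
  unfold Spec_ranges_intersect
  match rset with
  | [] => rfl
  | [r] => rfl
  | r :: b :: rest =>
    show (((b :: rest).foldl _ (some r)).map _) = _
    obtain ⟨p, q⟩ := r
    rw [foldl_inter (b :: rest) p q (by simp)]
    simp only [ranges_intersect_alt]
    split_ifs <;> simp
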